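-- pv_equiv track=rewrite | github.com/dshsfs-yt/re2025 | makedata.py | find_continue_space
-- ===== SOURCE A (Python) =====
-- def find_continue_space(text: str):
--     before = None
--     indexs = []
--     sentence = ""
--     for i, t in enumerate(text):
--         if before == t == " ":
--             indexs.append(i)
--         else:
--             sentence += t
--         before = t
--
--     return sentence, indexs
-- ===== SOURCE B (Python) =====
-- def find_continue_space(text):
--     # Run-skipping scan: on a space, jump over the whole run at once,
--     # keeping one space and recording the indices of the skipped ones.
--     parts = []
--     indexs = []
--     n = len(text)
--     i = 0
--     while i < n:
--         c = text[i]
--         parts.append(c)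
--         if c == ' ':
--             j = i + 1
--             while j < n and text[j] == ' ':
--                 indexs.append(j)
--                 j += 1
--             i = j
--         else:
--             i += 1
--     return ''.join(parts), indexs
-- ===== Notes on version B (the rewrite author's own statement) =====
-- stated objective: alternative
-- what changed: Replaced A's single stateful char-by-char scan (tracking the previous character in `before`) with a run-skipping index scan: on meeting a space it consumes the whole space run at once with an inner loop, recording the skipped indices, so no previous-character state is kept.
import Mathlib
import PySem

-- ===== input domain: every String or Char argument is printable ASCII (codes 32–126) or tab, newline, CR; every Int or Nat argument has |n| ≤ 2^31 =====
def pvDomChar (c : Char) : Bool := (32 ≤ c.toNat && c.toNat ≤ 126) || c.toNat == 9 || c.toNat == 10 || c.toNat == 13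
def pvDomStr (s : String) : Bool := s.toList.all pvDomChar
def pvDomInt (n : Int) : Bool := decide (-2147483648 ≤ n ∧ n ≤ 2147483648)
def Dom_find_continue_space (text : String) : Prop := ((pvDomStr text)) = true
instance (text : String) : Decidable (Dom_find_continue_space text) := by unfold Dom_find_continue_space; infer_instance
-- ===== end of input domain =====

-- B replaces A's stateful char-by-char scan (tracking the previous char) by a
-- run-skipping scan that jumps over each whole space run at once; objective: alternative.

-- ===== PORT A =====
-- one fold over enumerate(text) with state (before, indexs, sentence);
-- sentence is kept as a List Char and packed with String.ofList at the end
-- (Python's `sentence += t`), since Lean's String.append is kernel-opaque.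
def find_continue_space (text : String) : String × List Int :=
  let step := fun (st : Option Char × List Int × List Char) (p : Int × Char) =>
    if st.1 = some p.2 ∧ p.2 = ' ' then (some p.2, st.2.1 ++ [p.1], st.2.2)
    else (some p.2, st.2.1, st.2.2 ++ [p.2])
  let r := (PySem.List.enumerate text.toList 0).foldl step (none, [], [])
  (String.ofList r.2.2, r.2.1)

-- ===== PORT B =====
-- inner while loop of Source B: consume the leading run of spaces, returning
-- (their indices, the remaining chars, the next index)
def pvSkip : List Char → Int → List Int × List Char × Int
  | [], j => ([], [], j)
  | c :: rest, j =>
      if c = ' ' then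
        let s := pvSkip rest (j + 1)
        (j :: s.1, s.2.1, s.2.2)
      else ([], c :: rest, j)

theorem pvSkip_len : ∀ (l : List Char) (j : Int), (pvSkip l j).2.1.length ≤ l.length := by
  intro l
  induction l with
  | nil => intro j; simp [pvSkip]
  | cons c rest ih =>
      intro j
      by_cases hc : c = ' ' <;> simp [pvSkip, hc]
      exact Nat.le_succ_of_le (ih (j + 1))

-- outer while loop of Source B
def pvGo : List Char → Int → List Char × List Int
  | [], _ => ([], [])
  | c :: rest, i =>
      if c = ' ' then
        let s := pvSkip rest (i + 1)
        let r := pvGo s.2.1 s.2.2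
        (c :: r.1, s.1 ++ r.2)
      else
        let r := pvGo rest (i + 1)
        (c :: r.1, r.2)
termination_by l _ => l.length
decreasing_by
  · exact Nat.lt_succ_of_le (pvSkip_len rest (i + 1))
  · simp

def find_continue_space_alt (text : String) : String × List Int :=
  let r := pvGo text.toList 0
  (String.ofList r.1, r.2)

-- ===== PRECONDITION & SPEC =====
def Spec_find_continue_space (text : String) (out : String × List Int) : Prop := out = find_continue_space_alt text
instance (text : String) (out : String × List Int) : Decidable (Spec_find_continue_space text out) := by unfold Spec_find_continue_space; infer_instance

-- ===== CLAIM (what is proved, stated in full; the proofs are below) =====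
def Claim_equal_find_continue_space : Prop := ∀ (text : String), Dom_find_continue_space text → Spec_find_continue_space text (find_continue_space text)

-- ===== LEMMAS AND PROOFS =====

-- common recursive characterisation: result of the remaining scan given the previous char
def pvSpec (before : Option Char) (i : Int) : List Char → List Char × List Int
  | [] => ([], [])
  | c :: rest =>
      let r := pvSpec (some c) (i + 1) rest
      if before = some c ∧ c = ' ' then (r.1, i :: r.2) else (c :: r.1, r.2)

theorem pvSpec_congr : ∀ (l : List Char) (i : Int) (b1 b2 : Option Char),
    b1 ≠ some ' ' → b2 ≠ some ' ' → pvSpec b1 i l = pvSpec b2 i l := by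
  intro l
  induction l with
  | nil => intro i b1 b2 _ _; rfl
  | cons c rest _ =>
      intro i b1 b2 h1 h2
      have e1 : ¬ (b1 = some c ∧ c = ' ') := by
        rintro ⟨rfl, rfl⟩; exact h1 rfl
      have e2 : ¬ (b2 = some c ∧ c = ' ') := by
        rintro ⟨rfl, rfl⟩; exact h2 rfl
      simp [pvSpec, e1, e2]

theorem pvSpec_space : ∀ (l : List Char) (i : Int),
    pvSpec (some ' ') i l =
      ((pvSpec none (pvSkip l i).2.2 (pvSkip l i).2.1).1,
       (pvSkip l i).1 ++ (pvSpec none (pvSkip l i).2.2 (pvSkip l i).2.1).2) := by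
  intro l
  induction l with
  | nil => intro i; simp [pvSpec, pvSkip]
  | cons c rest ih =>
      intro i
      by_cases hc : c = ' '
      · subst hc
        simp [pvSpec, pvSkip, ih (i + 1)]
      · have e : ¬ ((some ' ' : Option Char) = some c ∧ c = ' ') := by
          rintro ⟨_, rfl⟩; exact hc rfl
        have e2 : ¬ ((none : Option Char) = some c ∧ c = ' ') := by
          rintro ⟨h, _⟩; cases h
        simp [pvSpec, pvSkip, hc]

theorem pvGo_eq : ∀ (l : List Char) (i : Int), pvGo l i = pvSpec none i l := by
  intro l i
  induction l, i using pvGo.induct with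
  | case1 i => simp [pvGo, pvSpec]
  | case2 rest i s ih =>
      have e : ¬ ((none : Option Char) = some ' ' ∧ (' ' : Char) = ' ') := by
        rintro ⟨h, _⟩; cases h
      have ih' : pvGo (pvSkip rest (i + 1)).2.1 (pvSkip rest (i + 1)).2.2
          = pvSpec none (pvSkip rest (i + 1)).2.2 (pvSkip rest (i + 1)).2.1 := ih
      simp [pvGo, ih', pvSpec, pvSpec_space]
  | case3 c rest i hc ih =>
      have e : ¬ ((none : Option Char) = some c ∧ c = ' ') := by
        rintro ⟨h, _⟩; cases h
      have hcongr := pvSpec_congr rest (i + 1) (some c) none (by simpa using hc) (by simp)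
      simp [pvGo, hc, pvSpec, ih, hcongr]

-- last character of the scanned prefix (A's `before` after the fold)
def pvLast (before : Option Char) : List Char → Option Char
  | [] => before
  | c :: rest => pvLast (some c) rest

theorem pvFoldA : ∀ (l : List Char) (i : Int) (before : Option Char)
    (ix : List Int) (sent : List Char),
    (PySem.List.enumerate l i).foldl
      (fun (st : Option Char × List Int × List Char) (p : Int × Char) =>
        if st.1 = some p.2 ∧ p.2 = ' ' then (some p.2, st.2.1 ++ [p.1], st.2.2)
        else (some p.2, st.2.1, st.2.2 ++ [p.2]))
      (before, ix, sent)
    = (pvLast before l, ix ++ (pvSpec before i l).2, sent ++ (pvSpec before i l).1) := by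
  intro l
  induction l with
  | nil => intro i before ix sent; simp [PySem.List.enumerate_nil, pvSpec, pvLast]
  | cons c rest ih =>
      intro i before ix sent
      rw [PySem.List.enumerate_cons, List.foldl_cons]
      by_cases h : before = some c ∧ c = ' '
      · simp only [if_pos h, ih, pvSpec, pvLast]
        simp
      · simp only [if_neg h, ih, pvSpec, pvLast]
        simp

-- ===== VERDICT (by name: the statement is the Claim_ definition above) =====
theorem find_continue_space_spec : Claim_equal_find_continue_space := by
  intro text _
  unfold Spec_find_continue_space find_continue_space find_continue_space_alt
  simp only [pvFoldA, pvGo_eq, List.nil_append]
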